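-- pv_equiv track=rewrite | github.com/Johin2/iterative-code-repair | experiments/subtask_classifier.py | classify_subtask
-- ===== SOURCE A (Python) =====
-- def classify_subtask(action_description: str, tool_used: str = "",
--                      context: str = "") -> str:
--     """
--     Classify an agent action into a sub-task type.
--
--     Args:
--         action_description: What the agent is doing (from its reasoning)
--         tool_used: The tool being invoked (e.g., "bash", "read_file", "edit_file")
--         context: Additional context about the action
--
--     Returns:
--         One of: EXPL, COMP, LOC, PATCH, TEST, VER
--     """
--     desc_lower = action_description.lower()
--     tool_lower = tool_used.lower()
--
--     # Rule-based classification from tool + description signals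
--     # Priority order matters: more specific rules first
--
--     # VERIFICATION: running tests, checking results
--     if any(kw in desc_lower for kw in ["run test", "pytest", "verify", "check output",
--                                         "check result", "validate", "assert"]):
--         return "VER"
--     if tool_lower == "bash" and any(kw in desc_lower for kw in ["test", "pytest", "unittest"]):
--         return "VER"
--
--     # TEST GENERATION: writing tests
--     if any(kw in desc_lower for kw in ["write test", "create test", "add test",
--                                         "test case", "test function"]):
--         return "TEST"
--     if tool_lower in ("edit_file", "write_file") and "test" in desc_lower:
--         return "TEST"
--
--     # PATCH GENERATION: writing/editing code (non-test)
--     if any(kw in desc_lower for kw in ["fix", "patch", "modify", "change", "implement",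
--                                         "write code", "add function", "refactor",
--                                         "update code", "edit"]):
--         return "PATCH"
--     if tool_lower in ("edit_file", "write_file") and "test" not in desc_lower:
--         return "PATCH"
--
--     # LOCALIZATION: finding specific code locations
--     if any(kw in desc_lower for kw in ["localize", "locate", "find the bug",
--                                         "identify", "which file", "where is",
--                                         "trace", "narrow down"]):
--         return "LOC"
--     if tool_lower == "search_code":
--         return "LOC"
--
--     # COMPREHENSION: reading and understanding code
--     if any(kw in desc_lower for kw in ["read", "understand", "analyze", "examine",
--                                         "look at", "review code", "study"]):
--         return "COMP"
--     if tool_lower in ("read_file", "open_file"):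
--         return "COMP"
--
--     # EXPLORATION: browsing repo structure
--     if any(kw in desc_lower for kw in ["list", "explore", "browse", "directory",
--                                         "find files", "search for", "grep", "ls"]):
--         return "EXPL"
--     if tool_lower == "bash" and any(kw in desc_lower for kw in ["ls", "find", "tree"]):
--         return "EXPL"
--
--     # Default: if we can't classify, assume it's the most expensive type
--     return "PATCH"
-- ===== SOURCE B (Python) =====
-- # Two independent rankers (description-based and tool-based) each yield a
-- # numeric priority rank; the final label is looked up at the MINIMUM of the
-- # two ranks, instead of one interleaved first-match if-chain.
--
-- # Description keyword groups at even ranks 0,2,4,6,8,10 (VER,TEST,PATCH,LOC,COMP,EXPL).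
-- _DESC_GROUPS = [
--     ("run test", "pytest", "verify", "check output",
--      "check result", "validate", "assert"),
--     ("write test", "create test", "add test", "test case", "test function"),
--     ("fix", "patch", "modify", "change", "implement", "write code",
--      "add function", "refactor", "update code", "edit"),
--     ("localize", "locate", "find the bug", "identify", "which file",
--      "where is", "trace", "narrow down"),
--     ("read", "understand", "analyze", "examine", "look at",
--      "review code", "study"),
--     ("list", "explore", "browse", "directory", "find files",
--      "search for", "grep", "ls"),
-- ]
--
-- # Rank -> label (ranks 12/13 are the unmatched defaults).
-- _LABELS = ["VER", "VER", "TEST", "TEST", "PATCH", "PATCH",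
--            "LOC", "LOC", "COMP", "COMP", "EXPL", "EXPL", "PATCH", "PATCH"]
--
--
-- def _desc_rank(desc):
--     """Rank of the first description keyword group that matches, else 12."""
--     for i, group in enumerate(_DESC_GROUPS):
--         if any(kw in desc for kw in group):
--             return 2 * i
--     return 12
--
--
-- def _tool_rank(desc, tool):
--     """Rank of the strongest tool-based rule that applies, else 13."""
--     if tool == "bash" and any(kw in desc for kw in ("test", "pytest", "unittest")):
--         return 1
--     if tool in ("edit_file", "write_file"):
--         return 3 if "test" in desc else 5
--     if tool == "search_code":
--         return 7
--     if tool in ("read_file", "open_file"):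
--         return 9
--     if tool == "bash" and any(kw in desc for kw in ("ls", "find", "tree")):
--         return 11
--     return 13
--
--
-- def classify_subtask(action_description: str, tool_used: str = "",
--                      context: str = "") -> str:
--     desc = action_description.lower()
--     tool = tool_used.lower()
--     return _LABELS[min(_desc_rank(desc), _tool_rank(desc, tool))]
-- ===== Notes on version B (the rewrite author's own statement) =====
-- stated objective: alternative
-- what changed: Replaces A's single interleaved first-match if-chain by two independent rankers (a description-group ranker and a tool-rule ranker) that each return a numeric priority rank; the result is a label-table lookup at the minimum of the two ranks.
import Mathlib
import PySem

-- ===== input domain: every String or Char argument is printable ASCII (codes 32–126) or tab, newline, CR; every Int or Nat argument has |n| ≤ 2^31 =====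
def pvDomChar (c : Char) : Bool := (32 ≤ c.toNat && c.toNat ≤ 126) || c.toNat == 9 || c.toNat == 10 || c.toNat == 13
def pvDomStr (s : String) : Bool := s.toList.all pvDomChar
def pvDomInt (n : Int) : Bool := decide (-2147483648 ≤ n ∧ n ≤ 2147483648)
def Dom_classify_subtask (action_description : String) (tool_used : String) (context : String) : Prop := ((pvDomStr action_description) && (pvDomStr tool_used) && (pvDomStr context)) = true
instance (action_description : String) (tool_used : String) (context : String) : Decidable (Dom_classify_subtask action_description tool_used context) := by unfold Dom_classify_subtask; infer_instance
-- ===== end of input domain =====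

-- B replaces A's interleaved priority if-chain by two independent rankers
-- (description rank, tool rank) combined by `min` and a label-table lookup
-- (objective: alternative decomposition; same behaviour, same cost).

-- ===== PORT A =====
-- literal transliteration of the if-chain; `kw in desc` is PySem.Chars.isIn
def classify_subtask (action_description : String) (tool_used : String) (context : String) : String :=
  let desc_lower := PySem.Chars.lower action_description.toList
  let tool_lower := PySem.Chars.lower tool_used.toList
  if ["run test", "pytest", "verify", "check output", "check result", "validate",
      "assert"].any (fun kw => PySem.Chars.isIn kw.toList desc_lower) then "VER"
  else if tool_lower == "bash".toList &&
      ["test", "pytest", "unittest"].any (fun kw => PySem.Chars.isIn kw.toList desc_lower) then "VER"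
  else if ["write test", "create test", "add test", "test case",
      "test function"].any (fun kw => PySem.Chars.isIn kw.toList desc_lower) then "TEST"
  else if (tool_lower == "edit_file".toList || tool_lower == "write_file".toList) &&
      PySem.Chars.isIn "test".toList desc_lower then "TEST"
  else if ["fix", "patch", "modify", "change", "implement", "write code", "add function",
      "refactor", "update code", "edit"].any (fun kw => PySem.Chars.isIn kw.toList desc_lower) then "PATCH"
  else if (tool_lower == "edit_file".toList || tool_lower == "write_file".toList) &&
      !(PySem.Chars.isIn "test".toList desc_lower) then "PATCH"
  else if ["localize", "locate", "find the bug", "identify", "which file", "where is",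
      "trace", "narrow down"].any (fun kw => PySem.Chars.isIn kw.toList desc_lower) then "LOC"
  else if tool_lower == "search_code".toList then "LOC"
  else if ["read", "understand", "analyze", "examine", "look at", "review code",
      "study"].any (fun kw => PySem.Chars.isIn kw.toList desc_lower) then "COMP"
  else if (tool_lower == "read_file".toList || tool_lower == "open_file".toList) then "COMP"
  else if ["list", "explore", "browse", "directory", "find files", "search for",
      "grep", "ls"].any (fun kw => PySem.Chars.isIn kw.toList desc_lower) then "EXPL"
  else if tool_lower == "bash".toList &&
      ["ls", "find", "tree"].any (fun kw => PySem.Chars.isIn kw.toList desc_lower) then "EXPL"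
  else "PATCH"

-- ===== PORT B =====
-- the description keyword groups at even ranks 0,2,4,6,8,10
def pvDescGroups : List (List String) :=
  [["run test", "pytest", "verify", "check output", "check result", "validate", "assert"],
   ["write test", "create test", "add test", "test case", "test function"],
   ["fix", "patch", "modify", "change", "implement", "write code", "add function",
    "refactor", "update code", "edit"],
   ["localize", "locate", "find the bug", "identify", "which file", "where is",
    "trace", "narrow down"],
   ["read", "understand", "analyze", "examine", "look at", "review code", "study"],
   ["list", "explore", "browse", "directory", "find files", "search for", "grep", "ls"]]

-- rank -> label table (ranks 12/13 are the unmatched defaults)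
def pvLabels : List String :=
  ["VER", "VER", "TEST", "TEST", "PATCH", "PATCH",
   "LOC", "LOC", "COMP", "COMP", "EXPL", "EXPL", "PATCH", "PATCH"]

-- Source B's _desc_rank: enumerate loop over the groups, first match at rank 2*i, else 12
def pvDescRank (desc : List Char) : List (List String) → Nat → Nat
  | [], _ => 12
  | g :: gs, i => if g.any (fun kw => PySem.Chars.isIn kw.toList desc) then 2 * i
                  else pvDescRank desc gs (i + 1)

-- Source B's _tool_rank: strongest applicable tool-based rule, else 13
def pvToolRank (desc tool : List Char) : Nat :=
  if tool == "bash".toList &&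
      ["test", "pytest", "unittest"].any (fun kw => PySem.Chars.isIn kw.toList desc) then 1
  else if tool == "edit_file".toList || tool == "write_file".toList then
    (if PySem.Chars.isIn "test".toList desc then 3 else 5)
  else if tool == "search_code".toList then 7
  else if tool == "read_file".toList || tool == "open_file".toList then 9
  else if tool == "bash".toList &&
      ["ls", "find", "tree"].any (fun kw => PySem.Chars.isIn kw.toList desc) then 11
  else 13

-- Source B's classify_subtask: label at the minimum of the two ranks
-- (list indexing is exact here: the rank is always < 14, so getD never defaults)
def classify_subtask_alt (action_description : String) (tool_used : String) (context : String) : String :=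
  let desc := PySem.Chars.lower action_description.toList
  let tool := PySem.Chars.lower tool_used.toList
  pvLabels.getD (min (pvDescRank desc pvDescGroups 0) (pvToolRank desc tool)) "PATCH"

-- ===== PRECONDITION & SPEC =====
def Spec_classify_subtask (action_description : String) (tool_used : String) (context : String) (out : String) : Prop := out = classify_subtask_alt action_description tool_used context
instance (action_description : String) (tool_used : String) (context : String) (out : String) : Decidable (Spec_classify_subtask action_description tool_used context out) := by unfold Spec_classify_subtask; infer_instance

-- ===== CLAIM (what is proved, stated in full; the proofs are below) =====
def Claim_equal_classify_subtask : Prop := ∀ (action_description : String) (tool_used : String) (context : String), Dom_classify_subtask action_description tool_used context → Spec_classify_subtask action_description tool_used context (classify_subtask action_description tool_used context)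

-- ===== LEMMAS AND PROOFS =====

-- boolean abstraction of both programs: A's first-true rule in the interleaved
-- chain is the rule of minimal rank, which is what B's min-of-rankers computes
theorem pvKey : ∀ (d0 d1 d2 d3 d4 d5 c1 ew td c7 c9 c11 : Bool),
    (if d0 then "VER"
     else if c1 then "VER"
     else if d1 then "TEST"
     else if ew && td then "TEST"
     else if d2 then "PATCH"
     else if ew && !td then "PATCH"
     else if d3 then "LOC"
     else if c7 then "LOC"
     else if d4 then "COMP"
     else if c9 then "COMP"
     else if d5 then "EXPL"
     else if c11 then "EXPL"
     else "PATCH")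
    = pvLabels.getD
        (min (if d0 then 2 * 0 else if d1 then 2 * 1 else if d2 then 2 * 2
              else if d3 then 2 * 3 else if d4 then 2 * 4 else if d5 then 2 * 5 else 12)
             (if c1 then 1 else if ew then (if td then 3 else 5)
              else if c7 then 7 else if c9 then 9 else if c11 then 11 else 13))
        "PATCH" := by decide

-- ===== VERDICT (by name: the statement is the Claim_ definition above) =====
theorem classify_subtask_spec : Claim_equal_classify_subtask := by
  intro ad tu ctx _
  show classify_subtask ad tu ctx = classify_subtask_alt ad tu ctx
  unfold classify_subtask classify_subtask_alt
  simp only [pvDescGroups, pvDescRank, pvToolRank]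
  exact pvKey _ _ _ _ _ _ _ _ _ _ _ _
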